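-- pv_equiv track=rewrite | github.com/murtuza10/Master-Thesis | Fine-tune/Find_Tokens_Per_Sentence.py | split_tokens_and_labels
-- ===== SOURCE A (Python) =====
-- def split_tokens_and_labels(tokens, labels, sentence_end_tokens={".", "!", "?"}):
--     """Split tokens and labels into sentence-level chunks."""
--     sentence_tokens = []
--     sentence_labels = []
--     all_sentences = []
--
--     for token, label in zip(tokens, labels):
--         sentence_tokens.append(token)
--         sentence_labels.append(label)
--         if token in sentence_end_tokens:
--             all_sentences.append({
--                 "tokens": sentence_tokens,
--                 "ner_tags": sentence_labels
--             })
--             sentence_tokens = []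
--             sentence_labels = []
--
--     if sentence_tokens:  # leftover sentence
--         all_sentences.append({
--             "tokens": sentence_tokens,
--             "ner_tags": sentence_labels
--         })
--
--     return all_sentences
-- ===== SOURCE B (Python) =====
-- def split_tokens_and_labels(tokens, labels, sentence_end_tokens={".", "!", "?"}):
--     """Split tokens and labels into sentence-level chunks."""
--     pairs = list(zip(tokens, labels))
--     n = len(pairs)
--     sentences = []
--     start = 0
--     while start < n:
--         cut = n
--         for i in range(start, n):
--             if pairs[i][0] in sentence_end_tokens:
--                 cut = i + 1
--                 break
--         chunk = pairs[start:cut]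
--         sentences.append({"tokens": [t for t, _ in chunk],
--                           "ner_tags": [l for _, l in chunk]})
--         start = cut
--     return sentences
-- ===== Notes on version B (the rewrite author's own statement) =====
-- stated objective: alternative
-- what changed: Replaces A's single accumulate-and-flush pass (running sentence_tokens/sentence_labels buffers flushed at each end token) with a cursor-based splitter: repeatedly scan for the next end token, slice out one whole sentence chunk of (token,label) pairs, and advance the cursor past it.
import Mathlib
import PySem

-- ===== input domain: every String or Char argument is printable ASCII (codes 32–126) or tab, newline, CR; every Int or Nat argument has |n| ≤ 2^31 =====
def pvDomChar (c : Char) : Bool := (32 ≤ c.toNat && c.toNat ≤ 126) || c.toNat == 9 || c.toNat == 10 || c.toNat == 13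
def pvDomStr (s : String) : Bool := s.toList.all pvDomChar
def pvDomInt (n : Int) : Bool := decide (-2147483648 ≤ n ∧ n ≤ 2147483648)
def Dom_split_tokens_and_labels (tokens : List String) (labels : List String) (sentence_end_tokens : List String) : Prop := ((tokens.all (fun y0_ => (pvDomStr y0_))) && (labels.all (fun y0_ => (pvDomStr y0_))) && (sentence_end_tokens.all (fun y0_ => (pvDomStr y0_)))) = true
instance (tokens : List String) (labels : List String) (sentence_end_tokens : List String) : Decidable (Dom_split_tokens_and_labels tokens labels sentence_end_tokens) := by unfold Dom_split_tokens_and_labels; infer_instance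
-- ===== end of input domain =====

-- B replaces A's accumulate-and-flush loop with a cursor-based sentence splitter (scan to the next end token, slice out one whole chunk, advance the cursor); alternative decomposition, same cost.


-- the dict {"tokens": ts, "ner_tags": ls} as an insertion-order association list (shared by both ports)
def pvMkSent (ts ls : List String) : List (String × List String) :=
  [("tokens", ts), ("ner_tags", ls)]

-- ===== PORT A =====
-- the body of A's for loop, state = (sentence_tokens, sentence_labels, all_sentences)
def pvStepA (ends : List String)
    (s : List String × List String × List (List (String × List String)))
    (p : String × String) :
    List String × List String × List (List (String × List String)) :=
  let sentence_tokens := s.1 ++ [p.1]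
  let sentence_labels := s.2.1 ++ [p.2]
  if ends.contains p.1 then
    ([], [], s.2.2 ++ [pvMkSent sentence_tokens sentence_labels])
  else
    (sentence_tokens, sentence_labels, s.2.2)

def split_tokens_and_labels (tokens : List String) (labels : List String) (sentence_end_tokens : List String) : List (List (String × List String)) :=
  let r := (List.zip tokens labels).foldl (pvStepA sentence_end_tokens) ([], [], [])
  if r.1 = [] then r.2.2 else r.2.2 ++ [pvMkSent r.1 r.2.1]

-- ===== PORT B =====
-- the inner 'for i in range(start, n): if pairs[i][0] in ends: cut = i + 1; break' scan
-- (cut = n when no end token from start on); scanning pairs[start:] is exactly findIdx? on pairs.drop start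
def pvFindCut (ends : List String) (pairs : List (String × String)) (start n : Nat) : Nat :=
  match (pairs.drop start).findIdx? (fun q => ends.contains q.1) with
  | some i => start + i + 1
  | none => n

theorem pvFindCut_gt (ends : List String) (pairs : List (String × String)) (start : Nat)
    (h : start < pairs.length) : start < pvFindCut ends pairs start pairs.length := by
  unfold pvFindCut
  cases (pairs.drop start).findIdx? (fun q => ends.contains q.1) with
  | none => exact h
  | some i => show start < start + i + 1; omega

-- the while loop of B: slice out pairs[start:cut] as one sentence, then start = cut
def pvAltLoop (ends : List String) (pairs : List (String × String)) (start : Nat) :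
    List (List (String × List String)) :=
  if h : start < pairs.length then
    pvMkSent
      ((PySem.List.slice pairs (some (start : Int)) (some ((pvFindCut ends pairs start pairs.length : Nat) : Int))).map Prod.fst)
      ((PySem.List.slice pairs (some (start : Int)) (some ((pvFindCut ends pairs start pairs.length : Nat) : Int))).map Prod.snd)
      :: pvAltLoop ends pairs (pvFindCut ends pairs start pairs.length)
  else []
termination_by pairs.length - start
decreasing_by
  have := pvFindCut_gt ends pairs start h
  omega

def split_tokens_and_labels_alt (tokens : List String) (labels : List String) (sentence_end_tokens : List String) : List (List (String × List String)) :=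
  pvAltLoop sentence_end_tokens (List.zip tokens labels) 0

-- ===== PRECONDITION & SPEC =====
def Spec_split_tokens_and_labels (tokens : List String) (labels : List String) (sentence_end_tokens : List String) (out : List (List (String × List String))) : Prop := out = split_tokens_and_labels_alt tokens labels sentence_end_tokens
instance (tokens : List String) (labels : List String) (sentence_end_tokens : List String) (out : List (List (String × List String))) : Decidable (Spec_split_tokens_and_labels tokens labels sentence_end_tokens out) := by unfold Spec_split_tokens_and_labels; infer_instance

-- ===== CLAIM (what is proved, stated in full; the proofs are below) =====
def Claim_equal_split_tokens_and_labels : Prop := ∀ (tokens : List String) (labels : List String) (sentence_end_tokens : List String), Dom_split_tokens_and_labels tokens labels sentence_end_tokens → Spec_split_tokens_and_labels tokens labels sentence_end_tokens (split_tokens_and_labels tokens labels sentence_end_tokens)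

-- ===== LEMMAS AND PROOFS =====

-- the common intermediate: one sentence off the front of a pair list, and the rest
def pvFirstSentence (ends : List String) (pairs : List (String × String)) :
    List (String × String) × List (String × String) :=
  match pairs.findIdx? (fun q => ends.contains q.1) with
  | some i => (pairs.take (i + 1), pairs.drop (i + 1))
  | none => (pairs, [])

theorem pvFirstSentence_rest_lt (ends : List String) (p : String × String)
    (ps : List (String × String)) :
    (pvFirstSentence ends (p :: ps)).2.length < (p :: ps).length := by
  unfold pvFirstSentence
  cases h : (p :: ps).findIdx? (fun q => ends.contains q.1) with
  | none => simp
  | some i => simp [List.length_drop]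

-- chunk-at-a-time recursion, the common form both ports are reduced to
def pvAltGo (ends : List String) (pairs : List (String × String)) :
    List (List (String × List String)) :=
  match pairs with
  | [] => []
  | p :: ps =>
    let fs := pvFirstSentence ends (p :: ps)
    pvMkSent (fs.1.map Prod.fst) (fs.1.map Prod.snd) :: pvAltGo ends fs.2
termination_by pairs.length
decreasing_by exact pvFirstSentence_rest_lt ends p ps

-- A's loop, rephrased as structural recursion carrying the two sentence buffers
def pvArec (ends : List String) (st sl : List String) :
    List (String × String) → List (List (String × List String))
  | [] => if st = [] then [] else [pvMkSent st sl]
  | p :: ps =>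
    if ends.contains p.1 then
      pvMkSent (st ++ [p.1]) (sl ++ [p.2]) :: pvArec ends [] [] ps
    else
      pvArec ends (st ++ [p.1]) (sl ++ [p.2]) ps

theorem foldA_eq (ends : List String) (pairs : List (String × String)) :
    ∀ st sl acc,
      (let r := pairs.foldl (pvStepA ends) (st, sl, acc);
       if r.1 = [] then r.2.2 else r.2.2 ++ [pvMkSent r.1 r.2.1]) = acc ++ pvArec ends st sl pairs := by
  induction pairs with
  | nil =>
    intro st sl acc
    by_cases h : st = [] <;> simp [pvArec, h]
  | cons p ps ih =>
    intro st sl acc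
    by_cases h : ends.contains p.1
    · simp only [List.foldl_cons, pvStepA, h, if_true, pvArec]
      rw [ih]
      simp
    · rw [Bool.not_eq_true] at h
      simp only [List.foldl_cons, pvStepA, h, Bool.false_eq_true, if_false, pvArec]
      rw [ih]

theorem fs_nil (ends : List String) : pvFirstSentence ends [] = ([], []) := rfl

theorem fs_cons_end (ends : List String) (p : String × String) (ps : List (String × String))
    (h : ends.contains p.1 = true) :
    pvFirstSentence ends (p :: ps) = ([p], ps) := by
  unfold pvFirstSentence
  rw [List.findIdx?_cons]
  simp only [h, if_true]
  simp

theorem fs_cons_not (ends : List String) (p : String × String) (ps : List (String × String))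
    (h : ends.contains p.1 = false) :
    pvFirstSentence ends (p :: ps) =
      (p :: (pvFirstSentence ends ps).1, (pvFirstSentence ends ps).2) := by
  unfold pvFirstSentence
  rw [List.findIdx?_cons]
  simp only [h, Bool.false_eq_true, if_false]
  cases h2 : ps.findIdx? (fun q => ends.contains q.1) with
  | none => simp
  | some i => simp [List.take_succ_cons, List.drop_succ_cons]

theorem altGo_cons (ends : List String) (p : String × String) (ps : List (String × String)) :
    pvAltGo ends (p :: ps) =
      pvMkSent ((pvFirstSentence ends (p :: ps)).1.map Prod.fst)
               ((pvFirstSentence ends (p :: ps)).1.map Prod.snd)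
        :: pvAltGo ends (pvFirstSentence ends (p :: ps)).2 := by
  rw [pvAltGo]

theorem altGo_ne_nil (ends : List String) (pairs : List (String × String)) (h : pairs ≠ []) :
    pvAltGo ends pairs =
      pvMkSent ((pvFirstSentence ends pairs).1.map Prod.fst)
               ((pvFirstSentence ends pairs).1.map Prod.snd)
        :: pvAltGo ends (pvFirstSentence ends pairs).2 := by
  cases pairs with
  | nil => exact absurd rfl h
  | cons p ps => exact altGo_cons ends p ps

theorem arec_eq_altGo_aux (ends : List String) :
    ∀ (pairs : List (String × String)), pairs ≠ [] → ∀ st sl,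
      pvArec ends st sl pairs =
        pvMkSent (st ++ (pvFirstSentence ends pairs).1.map Prod.fst)
                 (sl ++ (pvFirstSentence ends pairs).1.map Prod.snd)
          :: pvAltGo ends (pvFirstSentence ends pairs).2 := by
  intro pairs
  induction pairs with
  | nil => intro h; exact absurd rfl h
  | cons p ps ih =>
    intro _ st sl
    by_cases h : ends.contains p.1
    · rw [fs_cons_end ends p ps h]
      simp only [pvArec, h, if_true, List.map_cons, List.map_nil]
      cases ps with
      | nil => simp [pvArec, pvAltGo]
      | cons q qs =>
        rw [ih (by simp) [] []]
        rw [altGo_cons]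
        simp
    · rw [fs_cons_not ends p ps (by simpa using h)]
      rw [Bool.not_eq_true] at h
      simp only [pvArec, h, Bool.false_eq_true, if_false, List.map_cons]
      cases ps with
      | nil => simp [pvArec, fs_nil, pvAltGo]
      | cons q qs =>
        rw [ih (by simp) (st ++ [p.1]) (sl ++ [p.2])]
        simp

theorem arec_eq_altGo (ends : List String) (pairs : List (String × String)) :
    pvArec ends [] [] pairs = pvAltGo ends pairs := by
  cases pairs with
  | nil => simp [pvArec, pvAltGo]
  | cons p ps =>
    rw [arec_eq_altGo_aux ends (p :: ps) (by simp) [] []]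
    rw [altGo_cons]
    simp

theorem altLoop_eq_altGo (ends : List String) (pairs : List (String × String)) :
    ∀ k start, pairs.length - start ≤ k →
      pvAltLoop ends pairs start = pvAltGo ends (pairs.drop start) := by
  intro k
  induction k with
  | zero =>
    intro start hk
    have hle : pairs.length ≤ start := by omega
    rw [pvAltLoop, dif_neg (by omega), List.drop_eq_nil_of_le hle, pvAltGo]
  | succ k ih =>
    intro start hk
    by_cases h : start < pairs.length
    · have hne : pairs.drop start ≠ [] := by
        simp only [ne_eq, List.drop_eq_nil_iff]
        omega
      rw [pvAltLoop, dif_pos h, altGo_ne_nil ends _ hne]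
      cases hfi : (pairs.drop start).findIdx? (fun q => ends.contains q.1) with
      | some i =>
        have hcut : pvFindCut ends pairs start pairs.length = start + (i + 1) := by
          unfold pvFindCut; rw [hfi]; show start + i + 1 = start + (i + 1); omega
        have hfs : pvFirstSentence ends (pairs.drop start) =
            ((pairs.drop start).take (i + 1), (pairs.drop start).drop (i + 1)) := by
          unfold pvFirstSentence; rw [hfi]
        have hslice : PySem.List.slice pairs (some (start : Int)) (some ((start + (i + 1) : Nat) : Int))
            = (pairs.drop start).take (i + 1) := by
          rw [PySem.List.slice_natCast]
          congr 1
          omega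
        have htail : pairs.drop (start + (i + 1)) = (pairs.drop start).drop (i + 1) := by
          rw [List.drop_drop]
        rw [hcut, hslice, hfs, ih (start + (i + 1)) (by omega), htail]
      | none =>
        have hcut : pvFindCut ends pairs start pairs.length = pairs.length := by
          unfold pvFindCut; rw [hfi]
        have hfs : pvFirstSentence ends (pairs.drop start) = (pairs.drop start, []) := by
          unfold pvFirstSentence; rw [hfi]
        have hslice : PySem.List.slice pairs (some (start : Int)) (some ((pairs.length : Nat) : Int))
            = pairs.drop start := by
          rw [PySem.List.slice_natCast]
          exact List.take_of_length_le (by simp)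
        rw [hcut, hslice, hfs, pvAltLoop, dif_neg (by omega), pvAltGo]
    · rw [pvAltLoop, dif_neg h, List.drop_eq_nil_of_le (by omega), pvAltGo]

-- ===== VERDICT (by name: the statement is the Claim_ definition above) =====
theorem split_tokens_and_labels_spec : Claim_equal_split_tokens_and_labels := by
  intro tokens labels ends _
  unfold Spec_split_tokens_and_labels split_tokens_and_labels split_tokens_and_labels_alt
  have h := foldA_eq ends (List.zip tokens labels) [] [] []
  simp only [List.nil_append] at h
  rw [h, arec_eq_altGo]
  rw [altLoop_eq_altGo ends (List.zip tokens labels) (List.zip tokens labels).length 0 (by omega)]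
  rw [List.drop_zero]
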